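-- pv_equiv track=rewrite | github.com/EdwardZehuaZhang/3d-printing-monorepo | rhino8-internal-wire/actual pluggin folder/rh8/libs/UNNcBibN/wire_router/core.py | _orthogonal_offsets
-- ===== SOURCE A (Python) =====
-- from typing import Dict, FrozenSet, Iterable, Iterator, List, Optional, Sequence, Set, Tuple
--
-- GridIndex = Tuple[int, int, int]
--
-- def _nonzero_axis(offset: GridIndex) -> int:
--     for axis, value in enumerate(offset):
--         if value != 0:
--             return axis
--     raise ValueError("Offset has no non-zero axis.")
--
-- def _orthogonal_offsets(step_offset: GridIndex) -> List[GridIndex]: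
--     axis = _nonzero_axis(step_offset)
--     offsets: List[GridIndex] = []
--     for orthogonal_axis in range(3):
--         if orthogonal_axis == axis:
--             continue
--         positive = [0, 0, 0]
--         positive[orthogonal_axis] = 1
--         offsets.append((positive[0], positive[1], positive[2]))
--         offsets.append((-positive[0], -positive[1], -positive[2]))
--     return offsets
-- ===== SOURCE B (Python) =====
-- _DIRECTIONS = [
--     (1, 0, 0), (-1, 0, 0),
--     (0, 1, 0), (0, -1, 0),
--     (0, 0, 1), (0, 0, -1),
-- ]
--
-- def _nonzero_axis(offset):
--     for axis, value in enumerate(offset):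
--         if value != 0:
--             return axis
--     raise ValueError("Offset has no non-zero axis.")
--
-- def _orthogonal_offsets(step_offset):
--     axis = _nonzero_axis(step_offset)
--     return [d for d in _DIRECTIONS if d[axis] == 0]
-- ===== Notes on version B (the rewrite author's own statement) =====
-- stated objective: simpler
-- what changed: Replaces the per-axis build-a-mutable-unit-vector loop with a filter over a fixed table of the six unit directions, keeping those orthogonal to the step axis.
import Mathlib
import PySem

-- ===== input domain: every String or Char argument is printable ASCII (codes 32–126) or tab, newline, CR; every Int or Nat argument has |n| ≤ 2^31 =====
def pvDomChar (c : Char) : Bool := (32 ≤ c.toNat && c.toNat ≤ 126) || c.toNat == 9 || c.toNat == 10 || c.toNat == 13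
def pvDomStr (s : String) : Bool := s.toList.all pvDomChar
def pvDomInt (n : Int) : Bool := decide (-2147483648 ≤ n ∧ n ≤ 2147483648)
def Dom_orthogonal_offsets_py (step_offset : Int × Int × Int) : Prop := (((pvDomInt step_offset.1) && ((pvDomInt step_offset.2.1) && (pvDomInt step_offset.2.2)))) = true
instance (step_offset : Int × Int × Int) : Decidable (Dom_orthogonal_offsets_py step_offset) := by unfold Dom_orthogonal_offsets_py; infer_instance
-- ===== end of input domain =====

-- B replaces A's per-axis build-two-unit-vectors loop with a filter over a fixed
-- table of the six unit directions (objective: simpler).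


-- ===== PORT A =====
-- _nonzero_axis, shared by both Pythons: first axis with a non-zero value,
-- none = the ValueError branch (excluded by Pre_).
def pvNonzeroAxis (offset : Int × Int × Int) : Option Int :=
  (PySem.List.enumerate [offset.1, offset.2.1, offset.2.2]).findSome?
    (fun av => if av.2 ≠ 0 then some av.1 else none)

def orthogonal_offsets_py (step_offset : Int × Int × Int) : List (Int × Int × Int) :=
  match pvNonzeroAxis step_offset with
  | none => []   -- Python raises ValueError here; excluded by Pre_
  | some axis =>
    (PySem.List.pyRange 0 3 1).foldl
      (fun offsets orthogonal_axis =>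
        if orthogonal_axis = axis then offsets
        else
          let positive := ([0, 0, 0] : List Int).set orthogonal_axis.toNat 1
          (offsets ++ [(positive.getD 0 0, positive.getD 1 0, positive.getD 2 0)])
            ++ [(-(positive.getD 0 0), -(positive.getD 1 0), -(positive.getD 2 0))])
      []

-- ===== PORT B =====
def pvDirections : List (Int × Int × Int) :=
  [(1, 0, 0), (-1, 0, 0), (0, 1, 0), (0, -1, 0), (0, 0, 1), (0, 0, -1)]

def orthogonal_offsets_py_alt (step_offset : Int × Int × Int) : List (Int × Int × Int) :=
  match pvNonzeroAxis step_offset with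
  | none => []   -- Python raises ValueError here; excluded by Pre_
  | some axis =>
    pvDirections.filter
      (fun d => (if axis = 0 then d.1 else if axis = 1 then d.2.1 else d.2.2) = 0)

-- ===== PRECONDITION & SPEC =====
-- Pre_ excludes exactly the all-zero offset, on which both Pythons raise ValueError.
def Pre_orthogonal_offsets_py (step_offset : Int × Int × Int) : Prop :=
  ¬ (step_offset.1 = 0 ∧ step_offset.2.1 = 0 ∧ step_offset.2.2 = 0)
instance (step_offset : Int × Int × Int) : Decidable (Pre_orthogonal_offsets_py step_offset) := by
  unfold Pre_orthogonal_offsets_py; infer_instance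

def pvWitness_orthogonal_offsets_py : (Int × Int × Int) := (0, 0, 1)

def Spec_orthogonal_offsets_py (step_offset : Int × Int × Int) (out : List (Int × Int × Int)) : Prop := out = orthogonal_offsets_py_alt step_offset
instance (step_offset : Int × Int × Int) (out : List (Int × Int × Int)) : Decidable (Spec_orthogonal_offsets_py step_offset out) := by unfold Spec_orthogonal_offsets_py; infer_instance

-- ===== CLAIM (what is proved, stated in full; the proofs are below) =====
def Claim_equal_orthogonal_offsets_py : Prop := ∀ (step_offset : Int × Int × Int), Dom_orthogonal_offsets_py step_offset → Pre_orthogonal_offsets_py step_offset → Spec_orthogonal_offsets_py step_offset (orthogonal_offsets_py step_offset)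

-- ===== LEMMAS AND PROOFS =====

-- ===== VERDICT (by name: the statement is the Claim_ definition above) =====
theorem orthogonal_offsets_py_spec : Claim_equal_orthogonal_offsets_py := by
  rintro ⟨x, y, z⟩ _ hpre
  unfold Spec_orthogonal_offsets_py orthogonal_offsets_py orthogonal_offsets_py_alt pvNonzeroAxis
  by_cases hx : x = 0 <;> by_cases hy : y = 0 <;> by_cases hz : z = 0 <;>
    simp_all [Pre_orthogonal_offsets_py, PySem.List.enumerate, PySem.List.pyRange, pvDirections,
      List.filter, List.foldl, List.range_succ]
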